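-- pv_equiv track=rewrite | github.com/MrBrantCode/unitest_baseline | mut_generate/mist_train_cf/cf_69327/solution.py | replace_sequence
-- ===== SOURCE A (Python) =====
-- def replace_sequence(string, string1, string2, n):
--     count = 0
--     words = string.split()
--     for i, word in enumerate(words):
--         if word == string1:
--             count += 1
--             if count >= n:
--                 words[i] = string2
--     return ' '.join(words)
-- ===== SOURCE B (Python) =====
-- def replace_sequence(string, string1, string2, n):
--     words = string.split()
--     positions = [i for i, w in enumerate(words) if w == string1]
--     for idx in positions[max(n - 1, 0):]:
--         words[idx] = string2
--     return ' '.join(words)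
-- ===== Notes on version B (the rewrite author's own statement) =====
-- stated objective: alternative
-- what changed: Replaced the interleaved count-and-replace loop by two passes: first collect the indices of all occurrences of string1, then overwrite only the tail of that index list starting at the clamped position max(n-1,0).
import Mathlib
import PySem

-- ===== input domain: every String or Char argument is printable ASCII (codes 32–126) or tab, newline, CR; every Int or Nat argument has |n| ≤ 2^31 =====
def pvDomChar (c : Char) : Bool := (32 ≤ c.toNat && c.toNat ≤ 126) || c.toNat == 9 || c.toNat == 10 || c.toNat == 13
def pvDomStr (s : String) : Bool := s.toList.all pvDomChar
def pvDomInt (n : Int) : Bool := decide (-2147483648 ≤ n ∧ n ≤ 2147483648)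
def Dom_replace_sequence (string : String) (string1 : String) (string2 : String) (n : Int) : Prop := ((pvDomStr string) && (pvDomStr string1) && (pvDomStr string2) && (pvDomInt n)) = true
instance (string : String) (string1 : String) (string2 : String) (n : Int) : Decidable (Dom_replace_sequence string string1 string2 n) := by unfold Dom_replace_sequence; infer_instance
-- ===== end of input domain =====

-- B replaces A's single interleaved count-and-replace loop by an index-collection pass
-- followed by a separate write pass over the clamped tail of the index list (alternative decomposition, same cost).

-- ===== PORT A =====
-- loop body of A: state (count, words); on a match bump count and, if count ≥ n, write string2 at that index
def pvStepA (string1 string2 : String) (n : Int) (st : Int × List String) (iw : Int × String) : Int × List String :=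
  if iw.2 == string1 then
    let c := st.1 + 1
    (c, if c ≥ n then st.2.set iw.1.toNat string2 else st.2)
  else st

def replace_sequence (string : String) (string1 : String) (string2 : String) (n : Int) : String :=
  let words := PySem.Str.split₀ string
  PySem.Str.join " " ((PySem.List.enumerate words).foldl (pvStepA string1 string2 n) (0, words)).2

-- ===== PORT B =====
def replace_sequence_alt (string : String) (string1 : String) (string2 : String) (n : Int) : String :=
  let words := PySem.Str.split₀ string
  let positions := ((PySem.List.enumerate words).filter (fun iw => iw.2 == string1)).map (·.1)
  let start := max (n - 1) 0
  PySem.Str.join " "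
    ((PySem.List.slice positions (some start) none).foldl
      (fun ws idx => ws.set idx.toNat string2) words)

-- ===== PRECONDITION & SPEC =====
def Spec_replace_sequence (string : String) (string1 : String) (string2 : String) (n : Int) (out : String) : Prop := out = replace_sequence_alt string string1 string2 n
instance (string : String) (string1 : String) (string2 : String) (n : Int) (out : String) : Decidable (Spec_replace_sequence string string1 string2 n out) := by unfold Spec_replace_sequence; infer_instance

-- ===== CLAIM (what is proved, stated in full; the proofs are below) =====
def Claim_equal_replace_sequence : Prop := ∀ (string : String) (string1 : String) (string2 : String) (n : Int), Dom_replace_sequence string string1 string2 n → Spec_replace_sequence string string1 string2 n (replace_sequence string string1 string2 n)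

-- ===== LEMMAS AND PROOFS =====

-- A's fold, started at count c, replaces exactly the matched indices past the first max(n-c-1,0) of them.
theorem pv_foldA_eq (string1 string2 : String) (n : Int) :
    ∀ (ps : List (Int × String)) (c : Int) (a : List String),
      (ps.foldl (pvStepA string1 string2 n) (c, a)).2 =
        (((ps.filter (fun iw => iw.2 == string1)).map (fun x => x.1)).drop (max (n - c - 1) 0).toNat).foldl
          (fun ws idx => ws.set idx.toNat string2) a := by
  intro ps
  induction ps with
  | nil => intro c a; simp
  | cons p rest ih =>
    intro c a
    by_cases h : p.2 == string1
    · simp only [List.foldl_cons, List.filter_cons, h, if_true, List.map_cons, pvStepA]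
      rw [ih]
      by_cases hn : c + 1 ≥ n
      · rw [if_pos hn]
        have h1 : (max (n - (c + 1) - 1) 0).toNat = 0 := by omega
        have h2 : (max (n - c - 1) 0).toNat = 0 := by omega
        rw [h1, h2]
        simp
      · rw [if_neg hn]
        have h1 : (max (n - c - 1) 0).toNat = (max (n - (c + 1) - 1) 0).toNat + 1 := by omega
        rw [h1]
        simp
    · simp only [List.foldl_cons, List.filter_cons, h, pvStepA]
      simp only [Bool.false_eq_true, if_false]
      exact ih c a
-- ===== VERDICT (by name: the statement is the Claim_ definition above) =====
theorem replace_sequence_spec : Claim_equal_replace_sequence := by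
  intro string string1 string2 n _
  unfold Spec_replace_sequence replace_sequence replace_sequence_alt
  have hs : ∀ (xs : List Int),
      PySem.List.slice xs (some (max (n - 1) 0)) none = xs.drop (max (n - 1) 0).toNat := by
    intro xs
    rw [PySem.List.slice_from]
    exact le_max_right _ _
  have hz : n - 0 - 1 = n - 1 := by ring
  simp only [hs, pv_foldA_eq, hz]
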